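-- pv_equiv track=rewrite | github.com/profjuri/chemDM | Models/functions_sub.py | unique_values_and_first_indices
-- ===== SOURCE A (Python) =====
-- def unique_values_and_first_indices(LIS):
--
--     '''Finds the unique values of a list and the first index in which they appeared'''
--
--     '''Arguments:
--                     LIS: list of objects that we want to find the unique values + first indices for (list)'''
--
--     '''Outputs:
--                     unique_values: unique version of the input list, no degeneracy (list)
--                     first_indices: list of indices where the elements of the unique values first appeared (list) '''
--
--
--     unique_values = []
--     first_indices = []
--     seen = {}
--
--     for i, num in enumerate(LIS):
--         if num not in seen:
--             seen[num] = i
--             unique_values.append(num)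
--             first_indices.append(i)
--
--     return unique_values, first_indices
-- ===== SOURCE B (Python) =====
-- def unique_values_and_first_indices(LIS):
--     unique_values = list(dict.fromkeys(LIS))
--     first = {}
--     for i, v in reversed(list(enumerate(LIS))):
--         first[v] = i
--     return unique_values, [first[v] for v in unique_values]
-- ===== Notes on version B (the rewrite author's own statement) =====
-- stated objective: alternative
-- what changed: B has no membership-guarded loop: it deduplicates with dict.fromkeys, builds the first-index table by an unconditional overwriting assignment over the list traversed in reverse (the last write, i.e. the first occurrence, wins), and extracts the indices in a final comprehension, instead of A's single forward loop appending to two parallel lists under a 'not in seen' guard.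
import Mathlib
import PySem

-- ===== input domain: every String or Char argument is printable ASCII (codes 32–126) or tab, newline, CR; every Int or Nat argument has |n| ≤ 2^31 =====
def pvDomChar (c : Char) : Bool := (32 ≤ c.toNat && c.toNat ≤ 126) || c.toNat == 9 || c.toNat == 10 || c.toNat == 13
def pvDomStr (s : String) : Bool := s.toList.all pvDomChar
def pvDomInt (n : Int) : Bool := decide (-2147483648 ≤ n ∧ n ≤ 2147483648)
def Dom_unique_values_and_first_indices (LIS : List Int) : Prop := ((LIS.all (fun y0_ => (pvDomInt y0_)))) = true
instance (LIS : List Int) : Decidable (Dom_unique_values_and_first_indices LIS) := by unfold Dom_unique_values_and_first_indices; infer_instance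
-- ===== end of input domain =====

-- B replaces A's guarded index-recording loop by dict.fromkeys dedup plus a reverse-pass overwrite dict (last write = first occurrence): a different decomposition, not measured faster.

-- ===== PORT A =====
def unique_values_and_first_indices (LIS : List Int) : List Int × List Int :=
  let st := (PySem.List.enumerate LIS).foldl
    (fun (st : List Int × List Int × PySem.Dict Int Int) p =>
      if st.2.2.contains p.2 then st
      else (st.1 ++ [p.2], st.2.1 ++ [p.1], st.2.2.insert p.2 p.1))
    ([], [], PySem.Dict.empty)
  (st.1, st.2.1)

-- ===== PORT B =====
-- first[v] is ported as first.getD v 0: exact here since every v the comprehension visits is a key of first.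
def unique_values_and_first_indices_alt (LIS : List Int) : List Int × List Int :=
  let unique_values := PySem.List.dedup LIS
  let first := ((PySem.List.enumerate LIS).reverse).foldl
    (fun (d : PySem.Dict Int Int) p => d.insert p.2 p.1) PySem.Dict.empty
  (unique_values, unique_values.map (fun v => first.getD v 0))

-- ===== PRECONDITION & SPEC =====
def Spec_unique_values_and_first_indices (LIS : List Int) (out : List Int × List Int) : Prop := out = unique_values_and_first_indices_alt LIS
instance (LIS : List Int) (out : List Int × List Int) : Decidable (Spec_unique_values_and_first_indices LIS out) := by unfold Spec_unique_values_and_first_indices; infer_instance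

-- ===== CLAIM (what is proved, stated in full; the proofs are below) =====
def Claim_equal_unique_values_and_first_indices : Prop := ∀ (LIS : List Int), Dom_unique_values_and_first_indices LIS → Spec_unique_values_and_first_indices LIS (unique_values_and_first_indices LIS)

-- ===== LEMMAS AND PROOFS =====

/-- Reference recursion: first occurrences (value, index) of elements not yet `seen`. -/
def pvFirsts : List Int → Int → List Int → List Int × List Int
  | [], _, _ => ([], [])
  | x :: l, i, seen =>
    if x ∈ seen then pvFirsts l (i + 1) seen
    else
      let r := pvFirsts l (i + 1) (seen ++ [x])
      (x :: r.1, i :: r.2)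

lemma pvA_loop (l : List Int) : ∀ (i : Int) (uv fi : List Int) (d : PySem.Dict Int Int),
    ((PySem.List.enumerate l i).foldl
      (fun (st : List Int × List Int × PySem.Dict Int Int) p =>
        if st.2.2.contains p.2 then st
        else (st.1 ++ [p.2], st.2.1 ++ [p.1], st.2.2.insert p.2 p.1))
      (uv, fi, d)).1 = uv ++ (pvFirsts l i d.keys).1 ∧
    ((PySem.List.enumerate l i).foldl
      (fun (st : List Int × List Int × PySem.Dict Int Int) p =>
        if st.2.2.contains p.2 then st
        else (st.1 ++ [p.2], st.2.1 ++ [p.1], st.2.2.insert p.2 p.1))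
      (uv, fi, d)).2.1 = fi ++ (pvFirsts l i d.keys).2 := by
  induction l with
  | nil => intro i uv fi d; simp [PySem.List.enumerate, pvFirsts]
  | cons x l ih =>
    intro i uv fi d
    rw [PySem.List.enumerate_cons]
    simp only [List.foldl_cons, pvFirsts]
    by_cases h : d.contains x = true
    · have hm : x ∈ d.keys := (PySem.Dict.contains_iff_mem_keys d x).mp h
      simp only [h, if_true, hm, if_true]
      exact ih (i + 1) uv fi d
    · have hc : d.contains x = false := by simpa using h
      have hm : x ∉ d.keys := fun hx => h ((PySem.Dict.contains_iff_mem_keys d x).mpr hx)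
      simp only [hc, Bool.false_eq_true, if_false, hm, if_false]
      have hk : (d.insert x i).keys = d.keys ++ [x] :=
        PySem.Dict.keys_insert_of_not_contains d i hc
      obtain ⟨h1, h2⟩ := ih (i + 1) (uv ++ [x]) (fi ++ [i]) (d.insert x i)
      rw [hk] at h1 h2
      constructor
      · rw [h1]; simp
      · rw [h2]; simp

lemma pvFirsts_fst (l : List Int) : ∀ (i : Int) (seen : List Int),
    (pvFirsts l i seen).1 = (PySem.Set.ofList l).filter (fun y => decide (y ∉ seen)) := by
  induction l with
  | nil => intro i seen; simp [pvFirsts, PySem.Set.ofList]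
  | cons x l ih =>
    intro i seen
    have hof : PySem.Set.ofList (x :: l) = x :: (PySem.Set.ofList l).filter (fun y => decide (y ≠ x)) := by
      have h1 : PySem.Set.ofList (x :: l) = PySem.Set.update [x] l := by
        simp [PySem.Set.ofList, PySem.Set.update, PySem.Set.add, PySem.Set.contains]
      rw [h1, PySem.Set.update_eq_append_filter]
      simp only [List.singleton_append, List.cons.injEq, true_and]
      apply List.filter_congr
      intro y _
      simp [PySem.Set.contains]
    rw [hof]
    simp only [pvFirsts]
    by_cases h : x ∈ seen
    · simp only [h, if_true, ih]
      simp only [List.filter_cons, h, not_true, decide_false]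
      simp only [List.filter_filter]
      apply List.filter_congr
      intro y _
      by_cases hy : y ∈ seen
      · simp [hy]
      · have : y ≠ x := fun e => hy (e ▸ h)
        simp [hy, this]
    · simp only [h, if_false, ih]
      simp only [List.filter_cons, h, not_false_iff, decide_true]
      congr 1
      simp only [List.filter_filter]
      apply List.filter_congr
      intro y _
      by_cases hy : y ∈ seen
      · simp [hy]
      · by_cases hx : y = x
        · simp [hx]
        · simp [hx, hy]

lemma pvFirsts_snd (l : List Int) : ∀ (p seen : List Int),
    (∀ v, v ∈ seen ↔ v ∈ p) →
    (pvFirsts l (p.length : Int) seen).2 =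
      (pvFirsts l (p.length : Int) seen).1.map
        (fun v => (((PySem.List.index? (p ++ l) v).getD 0 : Nat) : Int)) := by
  induction l with
  | nil => intro p seen _; simp [pvFirsts]
  | cons x l ih =>
    intro p seen hequiv
    simp only [pvFirsts]
    by_cases h : x ∈ seen
    · simp only [h, if_true]
      have hcast : ((p.length : Int) + 1) = (((p ++ [x]).length : Nat) : Int) := by
        simp
      have hlist : p ++ x :: l = (p ++ [x]) ++ l := by simp
      rw [hcast, hlist]
      have hp : x ∈ p := (hequiv x).mp h
      exact ih (p ++ [x]) seen (by
        intro v
        constructor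
        · intro hv; exact List.mem_append_left _ ((hequiv v).mp hv)
        · intro hv
          rcases List.mem_append.mp hv with hv | hv
          · exact (hequiv v).mpr hv
          · have hvx : v = x := by simpa using hv
            exact hvx ▸ h)
    · simp only [h, if_false, List.map_cons]
      have hxp : x ∉ p := fun hx => h ((hequiv x).mpr hx)
      have hidx : PySem.List.index? (p ++ x :: l) x = some p.length := by
        rw [show p ++ x :: l = (p ++ [x]) ++ l by simp,
          PySem.List.index?_append_of_mem l (by simp : x ∈ p ++ [x])]
        exact PySem.List.index?_append_singleton_self p x hxp
      congr 1
      · rw [hidx]; rfl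
      · have hcast : ((p.length : Int) + 1) = (((p ++ [x]).length : Nat) : Int) := by
          simp
        have hlist : p ++ x :: l = (p ++ [x]) ++ l := by simp
        rw [hcast, hlist]
        exact ih (p ++ [x]) (seen ++ [x]) (by
          intro v
          simp only [List.mem_append, List.mem_singleton]
          rw [hequiv v])

lemma pvRevIns (l : List (Int × Int)) : ∀ (d : PySem.Dict Int Int) (v : Int),
    (l.reverse.foldl (fun (d : PySem.Dict Int Int) p => d.insert p.2 p.1) d).get? v =
      match l.find? (fun p => p.2 == v) with
      | some p => some p.1
      | none => d.get? v := by
  induction l with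
  | nil => intro d v; simp
  | cons p t ih =>
    intro d v
    rw [List.reverse_cons, List.foldl_append]
    simp only [List.foldl_cons, List.foldl_nil, List.find?_cons]
    by_cases hv : v = p.2
    · rw [hv, PySem.Dict.get?_insert_self]
      simp only [beq_self_eq_true]
    · have hb : (p.2 == v) = false := by rw [beq_eq_false_iff_ne]; exact fun e => hv e.symm
      rw [PySem.Dict.get?_insert_of_ne _ _ hv, ih d v, hb]

lemma pvFindEnum (l : List Int) : ∀ (s : Nat) (v : Int),
    (PySem.List.enumerate l (s : Int)).find? (fun p => p.2 == v) =
      (PySem.List.index? l v).map (fun k => (((s + k : Nat) : Int), v)) := by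
  induction l with
  | nil => intro s v; simp [PySem.List.enumerate]
  | cons x t ih =>
    intro s v
    rw [PySem.List.enumerate_cons]
    simp only [List.find?_cons]
    by_cases hv : x = v
    · subst hv
      rw [PySem.List.index?_cons_self]
      simp
    · have hb : (x == v) = false := by simpa using hv
      rw [hb, PySem.List.index?_cons_of_ne t hv]
      have hc : ((s : Int) + 1) = ((s + 1 : Nat) : Int) := by push_cast; ring
      rw [hc, ih (s + 1) v]
      cases PySem.List.index? t v with
      | none => simp
      | some k =>
        simp only [Option.map_some]
        have he : s + 1 + k = s + (k + 1) := by omega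
        rw [he]

-- ===== VERDICT (by name: the statement is the Claim_ definition above) =====
theorem unique_values_and_first_indices_spec : Claim_equal_unique_values_and_first_indices := by
  intro LIS _
  unfold Spec_unique_values_and_first_indices unique_values_and_first_indices unique_values_and_first_indices_alt
  obtain ⟨h1, h2⟩ := pvA_loop LIS 0 [] [] PySem.Dict.empty
  have hkeys : (PySem.Dict.empty : PySem.Dict Int Int).keys = [] := rfl
  rw [hkeys] at h1 h2
  have hfst : (pvFirsts LIS 0 []).1 = PySem.List.dedup LIS := by
    rw [pvFirsts_fst]
    simp [PySem.List.dedup_eq_ofList]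
  have hsnd := pvFirsts_snd LIS [] [] (by simp)
  simp only [List.length_nil, Nat.cast_zero, List.nil_append] at hsnd
  simp only [List.nil_append] at h1 h2
  have hmap : (PySem.List.dedup LIS).map
      (fun v => (((PySem.List.enumerate LIS).reverse).foldl
        (fun (d : PySem.Dict Int Int) p => d.insert p.2 p.1) PySem.Dict.empty).getD v 0)
      = (PySem.List.dedup LIS).map (fun v => (((PySem.List.index? LIS v).getD 0 : Nat) : Int)) := by
    apply List.map_congr_left
    intro v hv
    have hvl : v ∈ LIS := (PySem.List.mem_dedup LIS v).mp hv
    obtain ⟨k, hk⟩ := Option.isSome_iff_exists.mp ((PySem.List.index?_isSome_iff LIS v).mpr hvl)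
    have hget := pvRevIns (PySem.List.enumerate LIS) PySem.Dict.empty v
    have hfind := pvFindEnum LIS 0 v
    simp only [Nat.cast_zero, Nat.zero_add] at hfind
    rw [hfind, hk] at hget
    simp only [Option.map_some] at hget
    rw [PySem.Dict.getD_eq_get?_getD, hget, hk]
    rfl
  simp only [h1, h2, hsnd, hfst, hmap]
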